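-- pv_equiv track=rewrite | github.com/wye-jung/blsh | backup/macd_scanner.py | classify_supply
-- ===== SOURCE A (Python) =====
-- def classify_supply(qty_list):
--     """
--     수급 흐름 분류 → (flag_suffix, score)
--       TRN (+3): 직전 N-1일 순매도 → 오늘 순매수
--       C3  (+2): 3일 이상 연속 순매수
--       1   (+1): 오늘만 순매수
--       None ( 0): 해당 없음
--     """
--     if not qty_list or len(qty_list) < 2:
--         return None, 0
--     today   = qty_list[-1]
--     history = qty_list[:-1]
--     if today <= 0:
--         return None, 0
--     prev = history[-1] if history else 0
--     if prev <= 0: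
--         return "TRN", 3
--     consec = 1
--     for q in reversed(history):
--         if q > 0: consec += 1
--         else:     break
--     if consec >= 3:
--         return "C3", 2
--     return "1", 1
-- ===== SOURCE B (Python) =====
-- def classify_supply(qty_list):
--     if not qty_list or len(qty_list) < 2:
--         return None, 0
--     if qty_list[-1] <= 0:
--         return None, 0
--     run = 0
--     for q in qty_list:
--         run = run + 1 if q > 0 else 0
--     return {1: ("TRN", 3), 2: ("1", 1)}.get(run, ("C3", 2))
-- ===== Notes on version B (the rewrite author's own statement) =====
-- stated objective: alternative
-- what changed: B replaces A's backward break-on-first-nonpositive scan over history plus a separate prev<=0 branch with a single FORWARD fold over the whole list whose accumulator resets to 0 at each non-positive value (no break, no list reversal, no slicing), and maps the final run length to the result via a lookup table with default instead of an if-chain.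
import Mathlib
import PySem

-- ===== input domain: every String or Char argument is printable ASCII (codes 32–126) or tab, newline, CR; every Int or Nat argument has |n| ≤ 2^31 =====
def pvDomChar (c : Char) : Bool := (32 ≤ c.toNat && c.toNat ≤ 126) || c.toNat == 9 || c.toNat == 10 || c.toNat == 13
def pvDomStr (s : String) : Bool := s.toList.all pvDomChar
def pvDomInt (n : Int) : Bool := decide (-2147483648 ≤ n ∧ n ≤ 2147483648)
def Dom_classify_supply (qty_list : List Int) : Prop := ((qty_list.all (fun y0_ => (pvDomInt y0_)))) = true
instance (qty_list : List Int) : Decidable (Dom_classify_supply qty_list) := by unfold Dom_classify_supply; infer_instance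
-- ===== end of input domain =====

-- B replaces A's backward break-scan over history plus a separate prev<=0 branch by one forward
-- fold whose accumulator resets at non-positive values, then a table lookup (objective: alternative).

-- ===== PORT A =====
-- A's 'for q in reversed(history): if q > 0: consec += 1 else: break'
def csConsecA : List Int → Int → Int
  | [], c => c
  | q :: rest, c => if q > 0 then csConsecA rest (c + 1) else c

def classify_supply (qty_list : List Int) : Option String × Int :=
  if qty_list = [] ∨ qty_list.length < 2 then (none, 0)
  else
    -- qty_list[-1]: the guard makes the list nonempty, so the IndexError branch is unreachable
    let today := (PySem.List.pyGet? qty_list (-1)).getD 0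
    let history := PySem.List.slice qty_list none (some (-1))
    if today ≤ 0 then (none, 0)
    else
      let prev := if history ≠ [] then (PySem.List.pyGet? history (-1)).getD 0 else 0
      if prev ≤ 0 then ("TRN", 3)
      else
        let consec := csConsecA history.reverse 1
        if consec ≥ 3 then ("C3", 2) else ("1", 1)

-- ===== PORT B =====
-- B's forward loop 'run = run + 1 if q > 0 else 0' and the dict .get with default
def classify_supply_alt (qty_list : List Int) : Option String × Int :=
  if qty_list = [] ∨ qty_list.length < 2 then (none, 0)
  else if (PySem.List.pyGet? qty_list (-1)).getD 0 ≤ 0 then (none, 0)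
  else
    let run := qty_list.foldl (fun r q => if q > 0 then r + 1 else 0) 0
    PySem.Dict.getD (PySem.Dict.ofList [((1 : Int), ((some "TRN" : Option String), (3 : Int))), (2, (some "1", 1))]) run (some "C3", 2)

-- ===== PRECONDITION & SPEC =====
def Spec_classify_supply (qty_list : List Int) (out : Option String × Int) : Prop := out = classify_supply_alt qty_list
instance (qty_list : List Int) (out : Option String × Int) : Decidable (Spec_classify_supply qty_list out) := by unfold Spec_classify_supply; infer_instance

-- ===== CLAIM =====
def Claim_equal_classify_supply : Prop := ∀ (qty_list : List Int), Dom_classify_supply qty_list → Spec_classify_supply qty_list (classify_supply qty_list)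

-- ===== LEMMAS AND PROOFS =====

-- the trailing-run measured backwards with break, used only inside the proofs
def csRunB : List Int → Int → Int
  | [], r => r
  | q :: rest, r => if q ≤ 0 then r else csRunB rest (r + 1)

theorem csConsecA_eq_csRunB (l : List Int) (c : Int) : csConsecA l c = csRunB l c := by
  induction l generalizing c with
  | nil => rfl
  | cons q rest ih =>
      simp only [csConsecA, csRunB]
      by_cases h : q ≤ 0
      · simp [h, not_lt.mpr h]
      · simp [h, lt_of_not_ge h, ih]

theorem csRunB_shift (l : List Int) (r : Int) : csRunB l r = r + csRunB l 0 := by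
  induction l generalizing r with
  | nil => simp [csRunB]
  | cons q rest ih =>
      simp only [csRunB]
      by_cases h : q ≤ 0
      · simp [h]
      · simp only [h, if_false]
        rw [ih (r + 1), ih (0 + 1)]; ring

theorem le_csRunB (l : List Int) (r : Int) : r ≤ csRunB l r := by
  induction l generalizing r with
  | nil => simp [csRunB]
  | cons q rest ih =>
      simp only [csRunB]
      split
      · exact le_refl r
      · exact le_trans (by omega) (ih (r + 1))

theorem csRunB_all_pos (l : List Int) (r : Int) (h : ∀ q ∈ l, 0 < q) :
    csRunB l r = r + l.length := by
  induction l generalizing r with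
  | nil => simp [csRunB]
  | cons q rest ih =>
      have hq : ¬ q ≤ 0 := not_le.mpr (h q (by simp))
      simp only [csRunB, hq, if_false, List.length_cons]
      rw [ih (r + 1) (fun x hx => h x (by simp [hx]))]
      push_cast; ring

-- B's forward reset-fold computes the trailing positive run
theorem foldl_reset_eq_csRunB (l : List Int) :
    l.foldl (fun r q => if q > 0 then r + 1 else 0) 0 = csRunB l.reverse 0 := by
  suffices h : ∀ (l : List Int) (r : Int),
      l.foldl (fun r q => if q > 0 then r + 1 else 0) r =
        if l.all (fun q => decide (0 < q)) then r + l.length else csRunB l.reverse 0 by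
    rw [h l 0]
    by_cases hall : l.all (fun q => decide (0 < q))
    · rw [csRunB_all_pos l.reverse 0 (by
        intro q hq
        exact of_decide_eq_true (List.all_eq_true.mp hall q (List.mem_reverse.mp hq)))]
      simp [hall]
    · simp [hall]
  intro l
  induction l using List.reverseRecOn with
  | nil => simp
  | append_singleton xs t ih =>
      intro r
      rw [List.foldl_append]
      simp only [List.foldl_cons, List.foldl_nil, List.all_append, List.all_cons, List.all_nil,
        List.reverse_append, List.reverse_cons, List.reverse_nil, List.nil_append,
        List.cons_append, List.length_append, List.length_cons, List.length_nil]
      by_cases ht : 0 < t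
      · have hrt : csRunB (t :: xs.reverse) 0 = csRunB xs.reverse 1 := by
          simp [csRunB, not_le.mpr ht]
        simp only [ht, if_true, decide_true, Bool.and_true, ih r, hrt]
        by_cases hall : xs.all (fun q => decide (0 < q))
        · have : csRunB xs.reverse 1 = 1 + xs.reverse.length :=
            csRunB_all_pos xs.reverse 1 (fun q hq =>
              of_decide_eq_true (List.all_eq_true.mp hall q (List.mem_reverse.mp hq)))
          simp only [hall, if_true, this, List.length_reverse]
          push_cast; ring
        · simp [hall, csRunB_shift xs.reverse 1]
          omega
      · have ht' : t ≤ 0 := not_lt.mp ht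
        simp [ht', ht, csRunB]

theorem classify_supply_spec : Claim_equal_classify_supply := by
  intro l _
  unfold Spec_classify_supply classify_supply classify_supply_alt
  induction l using List.reverseRecOn with
  | nil => simp
  | append_singleton xs t _ =>
      cases xs using List.reverseRecOn with
      | nil => simp
      | append_singleton ys p _ =>
          have hlen : ¬ (ys ++ [p] ++ [t] = [] ∨ (ys ++ [p] ++ [t]).length < 2) := by simp
          simp only [hlen, if_false]
          rw [PySem.List.pyGet?_neg_one_append_singleton (ys ++ [p]) t,
              PySem.List.slice_to_neg_one]
          have hdl : (ys ++ [p] ++ [t]).dropLast = ys ++ [p] := by simp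
          rw [hdl]
          by_cases ht : t ≤ 0
          · simp [ht]
          · simp only [Option.getD_some, ht, if_false]
            rw [foldl_reset_eq_csRunB]
            have hrev : (ys ++ [p] ++ [t]).reverse = t :: p :: ys.reverse := by simp
            rw [hrev]
            have hrun : csRunB (t :: p :: ys.reverse) 0 = csRunB (p :: ys.reverse) 1 := by
              simp [csRunB, ht]
            rw [hrun]
            have hprev : (if (ys ++ [p] : List Int) ≠ [] then
                (PySem.List.pyGet? (ys ++ [p]) (-1)).getD 0 else 0) = p := by
              simp [PySem.List.pyGet?_neg_one_append_singleton]
            rw [hprev]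
            by_cases hp : p ≤ 0
            · have h1 : csRunB (p :: ys.reverse) 1 = 1 := by simp [csRunB, hp]
              simp only [hp, if_true, h1]
              decide
            · have h1 : csRunB (p :: ys.reverse) 1 = csRunB ys.reverse 2 := by
                simp [csRunB, hp]
              have h2 : (2 : Int) ≤ csRunB ys.reverse 2 := le_csRunB _ _
              have hc : csConsecA ((ys ++ [p]).reverse) 1 = csRunB (p :: ys.reverse) 1 := by
                rw [csConsecA_eq_csRunB]; simp
              have hrge : (2 : Int) ≤ csRunB (p :: ys.reverse) 1 := h1 ▸ h2
              simp only [hp, if_false, hc]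
              by_cases h3 : csRunB (p :: ys.reverse) 1 ≥ 3
              · have hne1 : csRunB (p :: ys.reverse) 1 ≠ (1 : Int) := by omega
                have hne2 : csRunB (p :: ys.reverse) 1 ≠ (2 : Int) := by omega
                simp [h3, PySem.Dict.ofList, PySem.Dict.update, List.foldl,
                  PySem.Dict.getD_insert, PySem.Dict.getD_empty, hne1, hne2]
              · have heq2 : csRunB (p :: ys.reverse) 1 = 2 := by omega
                simp only [heq2]
                decide
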